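-- pv_equiv track=rewrite | github.com/DancingOnAir/LeetcodePythonSolution | dfs/2101_detonate_the_maximum_bombs.py | maximumDetonation1
-- ===== SOURCE A (Python) =====
-- from typing import List
--
-- def maximumDetonation1(bombs: List[List[int]]) -> int:
--     n = len(bombs)
--     g = [[] for _ in range(n)]
--     for i in range(n - 1):
--         for j in range(i + 1, n):
--             dis = (bombs[i][0] - bombs[j][0]) ** 2 + (bombs[i][1] - bombs[j][1]) ** 2
--             if dis <= bombs[i][2] ** 2:
--                 g[i].append(j)
--             if dis <= bombs[j][2] ** 2:
--                 g[j].append(i)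
--
--     res = 0
--     for i in range(n):
--         seen = {i}
--         cur = 1
--         q = [i]
--         while q:
--             u = q.pop()
--             for v in g[u]:
--                 if v not in seen:
--                     seen.add(v)
--                     cur += 1
--                     q.append(v)
--         res = max(res, cur)
--
--     return res
-- ===== SOURCE B (Python) =====
-- from typing import List
--
-- def maximumDetonation1(bombs: List[List[int]]) -> int:
--     # No adjacency list: each source runs a stack-based flood that rescans all
--     # bombs inline to find the ones inside the popped bomb's blast radius.
--     n = len(bombs)
--     res = 0
--     for i in range(n):
--         seen = {i}
--         cur = 1
--         stack = [i]
--         while stack: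
--             u = stack.pop()
--             for v in range(n):
--                 if v != u and (bombs[u][0] - bombs[v][0]) ** 2 + (bombs[u][1] - bombs[v][1]) ** 2 <= bombs[u][2] ** 2 and v not in seen:
--                     seen.add(v)
--                     cur += 1
--                     stack.append(v)
--         res = max(res, cur)
--     return res
-- ===== Notes on version B (the rewrite author's own statement) =====
-- stated objective: alternative
-- what changed: Drops A's precomputed adjacency-list build entirely: each source runs a stack flood-fill that rescans all bombs inline with the squared-distance test to expand a popped node, instead of A's build-graph-then-traverse.
import Mathlib
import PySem

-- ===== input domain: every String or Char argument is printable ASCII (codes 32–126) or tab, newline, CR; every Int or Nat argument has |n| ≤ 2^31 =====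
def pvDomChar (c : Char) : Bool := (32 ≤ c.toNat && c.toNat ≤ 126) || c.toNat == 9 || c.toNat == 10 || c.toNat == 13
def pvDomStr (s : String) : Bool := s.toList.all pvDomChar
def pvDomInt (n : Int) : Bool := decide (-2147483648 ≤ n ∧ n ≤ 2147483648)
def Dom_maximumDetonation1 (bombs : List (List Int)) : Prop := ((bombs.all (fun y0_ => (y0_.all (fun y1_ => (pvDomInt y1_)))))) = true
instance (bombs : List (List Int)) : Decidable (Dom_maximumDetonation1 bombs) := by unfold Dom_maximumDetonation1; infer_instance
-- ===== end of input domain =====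

-- B drops A's adjacency-list build and instead flood-fills from each source by
-- rescanning all bombs inline with the squared-distance test (objective: alternative).

-- ===== PORT A =====

-- bombs[i][k] (indices always in range on admitted inputs)
def pvEntry (bombs : List (List Int)) (i k : Int) : Int :=
  PySem.List.pyGetD (PySem.List.pyGetD bombs i []) k 0

-- A's double loop building the adjacency list g
def pvBuildG (bombs : List (List Int)) : Array (List Int) :=
  (PySem.List.pyRange 0 ((bombs.length : Int) - 1) 1).foldl (fun g i =>
    (PySem.List.pyRange (i + 1) (bombs.length : Int) 1).foldl (fun g j =>
      let dis := (pvEntry bombs i 0 - pvEntry bombs j 0) ^ 2 +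
                 (pvEntry bombs i 1 - pvEntry bombs j 1) ^ 2
      let g := if dis ≤ (pvEntry bombs i 2) ^ 2 then g.modify i.toNat (fun l => l ++ [j]) else g
      if dis ≤ (pvEntry bombs j 2) ^ 2 then g.modify j.toNat (fun l => l ++ [i]) else g) g)
    (Array.replicate bombs.length ([] : List Int))

-- A's inner `while q:` loop (state: seen, cur, q; the fuel bounds the number of pops)
def pvDfsA (g : Array (List Int)) : Nat → List Int → Int → List Int → Int
  | 0, _, cur, _ => cur
  | fuel + 1, seen, cur, q =>
    match q.getLast? with
    | none => cur
    | some u =>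
      let st := (g[u.toNat]?.getD []).foldl
        (fun st v => if v ∈ st.1 then st else (st.1 ++ [v], st.2.1 + 1, st.2.2 ++ [v]))
        (seen, cur, q.dropLast)
      pvDfsA g fuel st.1 st.2.1 st.2.2

def maximumDetonation1 (bombs : List (List Int)) : Int :=
  let g := pvBuildG bombs
  (PySem.List.pyRange 0 (bombs.length : Int) 1).foldl
    (fun res i => max res (pvDfsA g bombs.length [i] 1 [i])) 0

-- ===== PORT B =====

-- B's inner `while stack:` loop: expand the popped u by scanning every bomb inline
def pvFloodB (bombs : List (List Int)) : Nat → List Int → Int → List Int → Int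
  | 0, _, cur, _ => cur
  | fuel + 1, seen, cur, stack =>
    match stack.getLast? with
    | none => cur
    | some u =>
      let st := (PySem.List.pyRange 0 (bombs.length : Int) 1).foldl
        (fun st v =>
          if v ≠ u ∧
              (pvEntry bombs u 0 - pvEntry bombs v 0) ^ 2 +
                (pvEntry bombs u 1 - pvEntry bombs v 1) ^ 2 ≤ (pvEntry bombs u 2) ^ 2 ∧
              v ∉ st.1
          then (st.1 ++ [v], st.2.1 + 1, st.2.2 ++ [v]) else st)
        (seen, cur, stack.dropLast)
      pvFloodB bombs fuel st.1 st.2.1 st.2.2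

def maximumDetonation1_alt (bombs : List (List Int)) : Int :=
  (PySem.List.pyRange 0 (bombs.length : Int) 1).foldl
    (fun res i => max res (pvFloodB bombs bombs.length [i] 1 [i])) 0

-- ===== PRECONDITION & SPEC =====

-- A raises IndexError exactly when there are at least two bombs and some bomb has
-- fewer than 3 coordinates; Pre_ excludes only those raising inputs.
def Pre_maximumDetonation1 (bombs : List (List Int)) : Prop :=
  bombs.length ≤ 1 ∨ ∀ b ∈ bombs, 3 ≤ b.length

instance (bombs : List (List Int)) : Decidable (Pre_maximumDetonation1 bombs) := by
  unfold Pre_maximumDetonation1; infer_instance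

def pvWitness_maximumDetonation1 : List (List Int) := [[0, 0, 2], [1, 0, 1], [9, 9, 1]]

def Spec_maximumDetonation1 (bombs : List (List Int)) (out : Int) : Prop := out = maximumDetonation1_alt bombs
instance (bombs : List (List Int)) (out : Int) : Decidable (Spec_maximumDetonation1 bombs out) := by unfold Spec_maximumDetonation1; infer_instance

-- ===== CLAIM (what is proved, stated in full; the proofs are below) =====
def Claim_equal_maximumDetonation1 : Prop := ∀ (bombs : List (List Int)), Dom_maximumDetonation1 bombs → Pre_maximumDetonation1 bombs → Spec_maximumDetonation1 bombs (maximumDetonation1 bombs)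

-- ===== LEMMAS AND PROOFS =====

-- the blast edge relation: v is a distinct valid index within u's blast radius
def pvEdge (bombs : List (List Int)) (u v : Int) : Prop :=
  u ≠ v ∧ 0 ≤ v ∧ v < (bombs.length : Int) ∧
  (pvEntry bombs u 0 - pvEntry bombs v 0) ^ 2 +
    (pvEntry bombs u 1 - pvEntry bombs v 1) ^ 2 ≤ (pvEntry bombs u 2) ^ 2

def pvD (bombs : List (List Int)) (x y : Int) : Int :=
  (pvEntry bombs x 0 - pvEntry bombs y 0) ^ 2 + (pvEntry bombs x 1 - pvEntry bombs y 1) ^ 2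

def pvR (bombs : List (List Int)) (x : Int) : Int := (pvEntry bombs x 2) ^ 2

-- one processed pair (i, j) of A's builder, as a named step function
def pvStepG (bombs : List (List Int)) (i : Int) (g : Array (List Int)) (j : Int) : Array (List Int) :=
  let dis := (pvEntry bombs i 0 - pvEntry bombs j 0) ^ 2 +
             (pvEntry bombs i 1 - pvEntry bombs j 1) ^ 2
  let g := if dis ≤ (pvEntry bombs i 2) ^ 2 then g.modify i.toNat (fun l => l ++ [j]) else g
  if dis ≤ (pvEntry bombs j 2) ^ 2 then g.modify j.toNat (fun l => l ++ [i]) else g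

lemma pvBuildG_eq (bombs : List (List Int)) :
    pvBuildG bombs =
      (PySem.List.pyRange 0 ((bombs.length : Int) - 1) 1).foldl (fun g i =>
        (PySem.List.pyRange (i + 1) (bombs.length : Int) 1).foldl (pvStepG bombs i) g)
        (Array.replicate bombs.length ([] : List Int)) := rfl

lemma pvStepG_size (bombs : List (List Int)) (i : Int) (g : Array (List Int)) (j : Int) :
    (pvStepG bombs i g j).size = g.size := by
  unfold pvStepG; dsimp only; split_ifs <;> simp

lemma pvFoldG_size (bombs : List (List Int)) (i : Int) (L : List Int) :
    ∀ g : Array (List Int), (L.foldl (pvStepG bombs i) g).size = g.size := by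
  induction L with
  | nil => intro g; rfl
  | cons j L ih => intro g; simpa [List.foldl_cons, pvStepG_size] using ih (pvStepG bombs i g j)

lemma pvModify_mem (g : Array (List Int)) (i : Int) (w v : Int) (u : Nat)
    (hi : 0 ≤ i) (hu : u < g.size) :
    (v ∈ (g.modify i.toNat (fun l => l ++ [w]))[u]?.getD [] ↔
      v ∈ g[u]?.getD [] ∨ ((u : Int) = i ∧ v = w)) := by
  rw [Array.getElem?_modify]
  by_cases e : i.toNat = u
  · have : (u : Int) = i := by omega
    simp [e, Array.getElem?_eq_getElem hu, this]
  · have : ¬ ((u : Int) = i) := by omega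
    simp [e, this]

lemma pvStepG_mem (bombs : List (List Int)) (i : Int) (g : Array (List Int)) (j : Int)
    (u : Nat) (hu : u < g.size) (v : Int) (hi : 0 ≤ i) (hj : 0 ≤ j) :
    (v ∈ (pvStepG bombs i g j)[u]?.getD [] ↔
      v ∈ g[u]?.getD [] ∨
      ((u : Int) = i ∧ v = j ∧ pvD bombs i j ≤ pvR bombs i) ∨
      ((u : Int) = j ∧ v = i ∧ pvD bombs i j ≤ pvR bombs j)) := by
  unfold pvStepG pvD pvR
  dsimp only
  split_ifs with h1 h2 h2
  · rw [pvModify_mem _ j i v u hj (by simpa using hu), pvModify_mem _ i j v u hi hu]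
    tauto
  · rw [pvModify_mem _ j i v u hj hu]
    tauto
  · rw [pvModify_mem _ i j v u hi hu]
    tauto
  · tauto

lemma pvFoldG_mem (bombs : List (List Int)) (i : Int) (hi : 0 ≤ i) (L : List Int)
    (hL : ∀ j ∈ L, 0 ≤ j) :
    ∀ (g : Array (List Int)) (u : Nat), u < g.size → ∀ v : Int,
      (v ∈ (L.foldl (pvStepG bombs i) g)[u]?.getD [] ↔
        v ∈ g[u]?.getD [] ∨
        ((u : Int) = i ∧ v ∈ L ∧ pvD bombs i v ≤ pvR bombs i) ∨
        ((u : Int) ∈ L ∧ v = i ∧ pvD bombs i u ≤ pvR bombs u)) := by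
  induction L with
  | nil => intro g u hu v; simp
  | cons j L ih =>
    intro g u hu v
    have hj : 0 ≤ j := hL j (by simp)
    have hL' : ∀ x ∈ L, 0 ≤ x := fun x hx => hL x (by simp [hx])
    rw [List.foldl_cons,
      ih hL' (pvStepG bombs i g j) u (by rw [pvStepG_size]; exact hu) v,
      pvStepG_mem bombs i g j u hu v hi hj]
    constructor
    · rintro ((h | ⟨h1, h2, h3⟩ | ⟨h1, h2, h3⟩) | ⟨h1, h2, h3⟩ | ⟨h1, h2, h3⟩)
      · exact Or.inl h
      · subst h2; exact Or.inr (Or.inl ⟨h1, by simp, h3⟩)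
      · subst h1; exact Or.inr (Or.inr ⟨by simp, h2, by simpa using h3⟩)
      · exact Or.inr (Or.inl ⟨h1, by simp [h2], h3⟩)
      · exact Or.inr (Or.inr ⟨by simp [h1], h2, h3⟩)
    · rintro (h | ⟨h1, h2, h3⟩ | ⟨h1, h2, h3⟩)
      · exact Or.inl (Or.inl h)
      · rcases List.mem_cons.mp h2 with h2 | h2
        · subst h2; exact Or.inl (Or.inr (Or.inl ⟨h1, rfl, h3⟩))
        · exact Or.inr (Or.inl ⟨h1, h2, h3⟩)
      · rcases List.mem_cons.mp h1 with h1 | h1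
        · exact Or.inl (Or.inr (Or.inr ⟨h1, h2, by rw [← h1]; exact h3⟩))
        · exact Or.inr (Or.inr ⟨h1, h2, h3⟩)

lemma pvOuter_mem (bombs : List (List Int)) (I : List Int) (hI : ∀ i ∈ I, 0 ≤ i) :
    ∀ (g : Array (List Int)) (u : Nat), u < g.size → ∀ v : Int,
      (v ∈ (I.foldl (fun g i =>
          (PySem.List.pyRange (i + 1) (bombs.length : Int) 1).foldl (pvStepG bombs i) g) g)[u]?.getD [] ↔
        v ∈ g[u]?.getD [] ∨
        ∃ i ∈ I,
          (((u : Int) = i ∧ i < v ∧ v < (bombs.length : Int) ∧ pvD bombs i v ≤ pvR bombs i) ∨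
           (i < (u : Int) ∧ (u : Int) < (bombs.length : Int) ∧ v = i ∧ pvD bombs i u ≤ pvR bombs u))) := by
  induction I with
  | nil => intro g u hu v; simp
  | cons a I ih =>
    intro g u hu v
    have ha : 0 ≤ a := hI a (by simp)
    have hI' : ∀ x ∈ I, 0 ≤ x := fun x hx => hI x (by simp [hx])
    rw [List.foldl_cons, ih hI' _ u (by rw [pvFoldG_size]; exact hu) v,
        pvFoldG_mem bombs a ha _
          (fun j hj => by have := (PySem.List.mem_pyRange_one).mp hj; omega)
          g u hu v]
    simp only [PySem.List.mem_pyRange_one, List.mem_cons, exists_eq_or_imp]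
    constructor
    · rintro ((h | ⟨h1, h2, h3⟩ | ⟨h1, h2, h3⟩) | ⟨i, hiI, h⟩)
      · exact Or.inl h
      · exact Or.inr (Or.inl (Or.inl ⟨h1, by omega, by omega, h3⟩))
      · exact Or.inr (Or.inl (Or.inr ⟨by omega, by omega, h2, h3⟩))
      · exact Or.inr (Or.inr ⟨i, hiI, h⟩)
    · rintro (h | (⟨h1, h2, h3, h4⟩ | ⟨h1, h2, h3, h4⟩) | ⟨i, hiI, h⟩)
      · exact Or.inl (Or.inl h)
      · exact Or.inl (Or.inr (Or.inl ⟨h1, ⟨by omega, h3⟩, h4⟩))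
      · exact Or.inl (Or.inr (Or.inr ⟨⟨by omega, by omega⟩, h3, h4⟩))
      · exact Or.inr ⟨i, hiI, h⟩

lemma pvBuildG_mem (bombs : List (List Int)) (u : Int) (h0 : 0 ≤ u)
    (hn : u < (bombs.length : Int)) (v : Int) :
    (v ∈ (pvBuildG bombs)[u.toNat]?.getD [] ↔ pvEdge bombs u v) := by
  have hu : u.toNat < (Array.replicate bombs.length ([] : List Int)).size := by
    simp; omega
  have hcast : ((u.toNat : Int)) = u := by omega
  rw [pvBuildG_eq,
    pvOuter_mem bombs _ (fun i hi => ((PySem.List.mem_pyRange_one).mp hi).1) _ u.toNat hu v]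
  rw [hcast]
  have hbase : v ∈ (Array.replicate bombs.length ([] : List Int))[u.toNat]?.getD [] ↔ False := by
    simp [show u.toNat < bombs.length by omega]
  rw [hbase]
  simp only [PySem.List.mem_pyRange_one, false_or]
  unfold pvEdge
  constructor
  · rintro ⟨i, hiI, ⟨h1, h2, h3, h4⟩ | ⟨h1, h2, h3, h4⟩⟩
    · subst h1
      refine ⟨by omega, by omega, h3, by unfold pvD pvR at h4; exact h4⟩
    · subst h3
      refine ⟨by omega, by omega, by omega, ?_⟩
      unfold pvD pvR at h4
      calc (pvEntry bombs u 0 - pvEntry bombs v 0) ^ 2 + (pvEntry bombs u 1 - pvEntry bombs v 1) ^ 2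
          = (pvEntry bombs v 0 - pvEntry bombs u 0) ^ 2 + (pvEntry bombs v 1 - pvEntry bombs u 1) ^ 2 := by ring
        _ ≤ (pvEntry bombs u 2) ^ 2 := h4
  · rintro ⟨h1, h2, h3, h4⟩
    rcases lt_or_gt_of_ne h1 with hlt | hgt
    · refine ⟨u, by omega, Or.inl ⟨rfl, hlt, h3, ?_⟩⟩
      unfold pvD pvR; exact h4
    · refine ⟨v, by omega, Or.inr ⟨hgt, by omega, rfl, ?_⟩⟩
      unfold pvD pvR
      calc (pvEntry bombs v 0 - pvEntry bombs u 0) ^ 2 + (pvEntry bombs v 1 - pvEntry bombs u 1) ^ 2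
          = (pvEntry bombs u 0 - pvEntry bombs v 0) ^ 2 + (pvEntry bombs u 1 - pvEntry bombs v 1) ^ 2 := by ring
        _ ≤ (pvEntry bombs u 2) ^ 2 := h4

-- generic worklist loop shared by the proofs about both inner loops
def pvStep : (List Int × Int × List Int) → Int → (List Int × Int × List Int) :=
  fun st v => if v ∈ st.1 then st else (st.1 ++ [v], st.2.1 + 1, st.2.2 ++ [v])

def pvWL (nbr : Int → List Int) : Nat → List Int → Int → List Int → Int
  | 0, _, cur, _ => cur
  | fuel + 1, seen, cur, q =>
    match q.getLast? with
    | none => cur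
    | some u =>
      let st := (nbr u).foldl pvStep (seen, cur, q.dropLast)
      pvWL nbr fuel st.1 st.2.1 st.2.2

lemma pvDfsA_eq_wl (g : Array (List Int)) :
    ∀ (fuel : Nat) (seen : List Int) (cur : Int) (q : List Int),
      pvDfsA g fuel seen cur q = pvWL (fun u => g[u.toNat]?.getD []) fuel seen cur q := by
  intro fuel
  induction fuel with
  | zero => intro seen cur q; rfl
  | succ fuel ih =>
    intro seen cur q
    rw [pvDfsA, pvWL]
    cases q.getLast? with
    | none => rfl
    | some u => exact ih _ _ _

def pvNbrB (bombs : List (List Int)) (u : Int) : List Int :=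
  (PySem.List.pyRange 0 (bombs.length : Int) 1).filter (fun v =>
    decide (v ≠ u ∧
      (pvEntry bombs u 0 - pvEntry bombs v 0) ^ 2 +
        (pvEntry bombs u 1 - pvEntry bombs v 1) ^ 2 ≤ (pvEntry bombs u 2) ^ 2))

lemma pvFloodB_eq_wl (bombs : List (List Int)) :
    ∀ (fuel : Nat) (seen : List Int) (cur : Int) (q : List Int),
      pvFloodB bombs fuel seen cur q = pvWL (pvNbrB bombs) fuel seen cur q := by
  intro fuel
  induction fuel with
  | zero => intro seen cur q; rfl
  | succ fuel ih =>
    intro seen cur q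
    rw [pvFloodB, pvWL]
    cases q.getLast? with
    | none => rfl
    | some u =>
      have hfold : ∀ (L : List Int) (st : List Int × Int × List Int),
          L.foldl (fun st v =>
            if v ≠ u ∧
                (pvEntry bombs u 0 - pvEntry bombs v 0) ^ 2 +
                  (pvEntry bombs u 1 - pvEntry bombs v 1) ^ 2 ≤ (pvEntry bombs u 2) ^ 2 ∧
                v ∉ st.1
            then (st.1 ++ [v], st.2.1 + 1, st.2.2 ++ [v]) else st) st
          = (L.filter (fun v =>
              decide (v ≠ u ∧
                (pvEntry bombs u 0 - pvEntry bombs v 0) ^ 2 +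
                  (pvEntry bombs u 1 - pvEntry bombs v 1) ^ 2 ≤ (pvEntry bombs u 2) ^ 2))).foldl
              pvStep st := by
        intro L
        induction L with
        | nil => intro st; rfl
        | cons v L ihL =>
          intro st
          rw [List.foldl_cons, List.filter_cons]
          by_cases hc : v ≠ u ∧
              (pvEntry bombs u 0 - pvEntry bombs v 0) ^ 2 +
                (pvEntry bombs u 1 - pvEntry bombs v 1) ^ 2 ≤ (pvEntry bombs u 2) ^ 2
          · have hd : decide (v ≠ u ∧
                (pvEntry bombs u 0 - pvEntry bombs v 0) ^ 2 +
                  (pvEntry bombs u 1 - pvEntry bombs v 1) ^ 2 ≤ (pvEntry bombs u 2) ^ 2) = true := by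
              simpa using hc
            rw [hd, if_pos rfl, List.foldl_cons]
            by_cases hm : v ∈ st.1
            · rw [if_neg (fun h => h.2.2 hm), show pvStep st v = st from if_pos hm, ihL]
            · rw [if_pos ⟨hc.1, hc.2, hm⟩,
                show pvStep st v = (st.1 ++ [v], st.2.1 + 1, st.2.2 ++ [v]) from if_neg hm, ihL]
          · have hd : decide (v ≠ u ∧
                (pvEntry bombs u 0 - pvEntry bombs v 0) ^ 2 +
                  (pvEntry bombs u 1 - pvEntry bombs v 1) ^ 2 ≤ (pvEntry bombs u 2) ^ 2) = false := by
              simpa using hc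
            rw [hd, if_neg (fun h => hc ⟨h.1, h.2.1⟩), if_neg (by simp), ihL]
      dsimp only
      rw [hfold, ih]
      rfl

lemma pvNbrB_mem (bombs : List (List Int)) (u v : Int) :
    v ∈ pvNbrB bombs u ↔ pvEdge bombs u v := by
  unfold pvNbrB pvEdge
  simp only [List.mem_filter, PySem.List.mem_pyRange_one, decide_eq_true_eq]
  constructor
  · rintro ⟨⟨h1, h2⟩, h3, h4⟩; exact ⟨Ne.symm h3, h1, h2, h4⟩
  · rintro ⟨h1, h2, h3, h4⟩; exact ⟨⟨h2, h3⟩, Ne.symm h1, h4⟩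

lemma pvLen_le (n : Nat) (l : List Int) (hnd : l.Nodup)
    (hb : ∀ x ∈ l, 0 ≤ x ∧ x < (n : Int)) : l.length ≤ n := by
  classical
  have h1 : l.toFinset.card = l.length := List.toFinset_card_of_nodup hnd
  have h2 : l.toFinset ⊆ Finset.Ico (0 : Int) n := by
    intro x hx
    rcases hb x (List.mem_toFinset.mp hx) with ⟨ha, hbb⟩
    simp [Finset.mem_Ico, ha, hbb]
  have := Finset.card_le_card h2
  simpa [h1] using this

lemma pvClosed_reach (e : Int → Int → Prop) (T : Int → Prop)
    (hT : ∀ a b, T a → e a b → T b) :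
    ∀ u v, Relation.ReflTransGen e u v → T u → T v := by
  intro u v h hu
  induction h with
  | refl => exact hu
  | tail _ h2 ih => exact hT _ _ ih h2

lemma pvFold_facts (L : List Int) :
    ∀ (seen : List Int) (cur : Int) (q : List Int),
      ((∀ x : Int, x ∈ (L.foldl pvStep (seen, cur, q)).1 ↔ x ∈ seen ∨ x ∈ L) ∧
       (seen.Nodup → (L.foldl pvStep (seen, cur, q)).1.Nodup) ∧
       (cur = (seen.length : Int) →
         (L.foldl pvStep (seen, cur, q)).2.1 = ((L.foldl pvStep (seen, cur, q)).1.length : Int)) ∧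
       (∀ x : Int, x ∈ (L.foldl pvStep (seen, cur, q)).2.2 ↔ x ∈ q ∨ (x ∈ L ∧ x ∉ seen)) ∧
       (L.foldl pvStep (seen, cur, q)).2.2.length + seen.length =
         q.length + (L.foldl pvStep (seen, cur, q)).1.length) := by
  induction L with
  | nil =>
    intro seen cur q
    refine ⟨by simp, fun h => h, fun h => h, by simp, by simp⟩
  | cons v L ih =>
    intro seen cur q
    rw [List.foldl_cons]
    by_cases hm : v ∈ seen
    · rw [show pvStep (seen, cur, q) v = (seen, cur, q) from if_pos hm]
      obtain ⟨m1, m2, m3, m4, m5⟩ := ih seen cur q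
      refine ⟨?_, m2, m3, ?_, m5⟩
      · intro x; rw [m1]; by_cases hv : x = v <;> simp [hv, hm]
      · intro x; rw [m4]; by_cases hv : x = v <;> simp [hv, hm]
    · rw [show pvStep (seen, cur, q) v = (seen ++ [v], cur + 1, q ++ [v]) from if_neg hm]
      obtain ⟨m1, m2, m3, m4, m5⟩ := ih (seen ++ [v]) (cur + 1) (q ++ [v])
      refine ⟨?_, ?_, ?_, ?_, ?_⟩
      · intro x; rw [m1]; by_cases hv : x = v <;> simp [hv, hm]
      · intro h
        refine m2 ?_
        simp [List.nodup_append, h]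
        intro b hb hba
        exact hm (hba ▸ hb)
      · intro h; exact m3 (by simp [h])
      · intro x; rw [m4]; by_cases hv : x = v <;> simp [hv, hm]
      · simp only [List.length_append, List.length_singleton] at m5 ⊢
        omega

lemma pvWL_spec (nbr : Int → List Int) (e : Int → Int → Prop) (n : Nat)
    (hnbr : ∀ u, 0 ≤ u → u < (n : Int) → ∀ v, (v ∈ nbr u ↔ e u v))
    (hebd : ∀ u v, e u v → 0 ≤ v ∧ v < (n : Int)) :
    ∀ (fuel : Nat) (seen : List Int) (cur : Int) (q : List Int),
      seen.Nodup → (∀ x ∈ seen, 0 ≤ x ∧ x < (n : Int)) → (∀ x ∈ q, x ∈ seen) →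
      cur = (seen.length : Int) →
      (∀ u ∈ seen, u ∉ q → ∀ v, e u v → v ∈ seen) →
      q.length + (n - seen.length) ≤ fuel →
      ∃ S : List Int, pvWL nbr fuel seen cur q = (S.length : Int) ∧ S.Nodup ∧
        (∀ v, v ∈ S ↔ v ∈ seen ∨ ∃ u ∈ q, Relation.ReflTransGen e u v) := by
  intro fuel
  induction fuel with
  | zero =>
    intro seen cur q hnd hbd hq hcur _ hfuel
    have hq0 : q = [] := List.length_eq_zero_iff.mp (show q.length = 0 by omega)
    subst hq0
    refine ⟨seen, by simpa [pvWL] using hcur, hnd, fun v => by simp⟩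
  | succ fuel ihf =>
    intro seen cur q hnd hbd hq hcur hcl hfuel
    rw [pvWL]
    cases hql : q.getLast? with
    | none =>
      have hq0 : q = [] := List.getLast?_eq_none_iff.mp hql
      subst hq0
      exact ⟨seen, by simpa using hcur, hnd, fun v => by simp⟩
    | some u =>
      have hqne : q ≠ [] := by rintro rfl; simp at hql
      have hu : q.getLast hqne = u := by
        rw [List.getLast?_eq_getLast_of_ne_nil hqne] at hql
        exact Option.some_inj.mp hql
      have hqdec : q.dropLast ++ [u] = q := by
        rw [← hu]; exact List.dropLast_append_getLast hqne
      dsimp only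
      obtain ⟨m1, m2, m3, m4, m5⟩ := pvFold_facts (nbr u) seen cur q.dropLast
      have hu_seen : u ∈ seen := hq u (by rw [← hqdec]; simp)
      have hu_bd := hbd u hu_seen
      have hnbru : ∀ v, v ∈ nbr u ↔ e u v := hnbr u hu_bd.1 hu_bd.2
      have hnd' := m2 hnd
      have hbd' : ∀ x ∈ ((nbr u).foldl pvStep (seen, cur, q.dropLast)).1, 0 ≤ x ∧ x < (n : Int) := by
        intro x hx
        rcases (m1 x).mp hx with h | h
        · exact hbd x h
        · exact hebd u x ((hnbru x).mp h)
      have hq' : ∀ x ∈ ((nbr u).foldl pvStep (seen, cur, q.dropLast)).2.2,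
          x ∈ ((nbr u).foldl pvStep (seen, cur, q.dropLast)).1 := by
        intro x hx
        rcases (m4 x).mp hx with h | ⟨h1, _⟩
        · exact (m1 x).mpr (Or.inl (hq x ((List.dropLast_sublist q).subset h)))
        · exact (m1 x).mpr (Or.inr h1)
      have hcur' := m3 hcur
      have hcl' : ∀ w ∈ ((nbr u).foldl pvStep (seen, cur, q.dropLast)).1,
          w ∉ ((nbr u).foldl pvStep (seen, cur, q.dropLast)).2.2 →
          ∀ v, e w v → v ∈ ((nbr u).foldl pvStep (seen, cur, q.dropLast)).1 := by
        intro w hw hwq v hev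
        by_cases hwu : w = u
        · subst hwu
          exact (m1 v).mpr (Or.inr ((hnbru v).mpr hev))
        · by_cases hws : w ∈ seen
          · have hwnotq : w ∉ q := by
              intro hwq2
              rw [← hqdec] at hwq2
              rcases List.mem_append.mp hwq2 with h | h
              · exact hwq ((m4 w).mpr (Or.inl h))
              · exact hwu (by simpa using h)
            exact (m1 v).mpr (Or.inl (hcl w hws hwnotq v hev))
          · have hwn : w ∈ nbr u := by
              rcases (m1 w).mp hw with h | h
              · exact absurd h hws
              · exact h
            exact absurd ((m4 w).mpr (Or.inr ⟨hwn, hws⟩)) hwq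
      have hslen : seen.length ≤ n := pvLen_le n seen hnd hbd
      have hF1n : ((nbr u).foldl pvStep (seen, cur, q.dropLast)).1.length ≤ n :=
        pvLen_le n _ hnd' hbd'
      have hdl : q.dropLast.length + 1 = q.length := by
        conv_rhs => rw [← hqdec]
        simp
      have hfuel' : ((nbr u).foldl pvStep (seen, cur, q.dropLast)).2.2.length +
          (n - ((nbr u).foldl pvStep (seen, cur, q.dropLast)).1.length) ≤ fuel := by
        omega
      obtain ⟨S, hS1, hS2, hS3⟩ := ihf _ _ _ hnd' hbd' hq' hcur' hcl' hfuel'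
      refine ⟨S, hS1, hS2, ?_⟩
      intro v
      rw [hS3 v]
      constructor
      · rintro (hv | ⟨w, hw, hreach⟩)
        · rcases (m1 v).mp hv with h | h
          · exact Or.inl h
          · exact Or.inr ⟨u, by rw [← hqdec]; simp, Relation.ReflTransGen.single ((hnbru v).mp h)⟩
        · rcases (m4 w).mp hw with h | ⟨h1, _⟩
          · exact Or.inr ⟨w, (List.dropLast_sublist q).subset h, hreach⟩
          · exact Or.inr ⟨u, by rw [← hqdec]; simp,
              Relation.ReflTransGen.head ((hnbru w).mp h1) hreach⟩
      · rintro (hv | ⟨w, hw, hreach⟩)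
        · exact Or.inl ((m1 v).mpr (Or.inl hv))
        · have hwcase : w ∈ q.dropLast ∨ w = u := by
            rw [← hqdec] at hw
            simpa using hw
          rcases hwcase with h | rfl
          · exact Or.inr ⟨w, (m4 w).mpr (Or.inl h), hreach⟩
          · have hT : ∀ a b,
                (a ∈ ((nbr w).foldl pvStep (seen, cur, q.dropLast)).1 ∨
                  ∃ x ∈ ((nbr w).foldl pvStep (seen, cur, q.dropLast)).2.2,
                    Relation.ReflTransGen e x a) → e a b →
                (b ∈ ((nbr w).foldl pvStep (seen, cur, q.dropLast)).1 ∨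
                  ∃ x ∈ ((nbr w).foldl pvStep (seen, cur, q.dropLast)).2.2,
                    Relation.ReflTransGen e x b) := by
              rintro a b (ha | ⟨x, hx2, hr⟩) heab
              · by_cases haq : a ∈ ((nbr w).foldl pvStep (seen, cur, q.dropLast)).2.2
                · exact Or.inr ⟨a, haq, Relation.ReflTransGen.single heab⟩
                · exact Or.inl (hcl' a ha haq b heab)
              · exact Or.inr ⟨x, hx2, hr.tail heab⟩
            exact pvClosed_reach e _ hT w v hreach (Or.inl ((m1 w).mpr (Or.inl hu_seen)))

lemma pv_source_eq (bombs : List (List Int)) (i : Int) (h0 : 0 ≤ i)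
    (hn : i < (bombs.length : Int)) :
    pvDfsA (pvBuildG bombs) bombs.length [i] 1 [i] =
      pvFloodB bombs bombs.length [i] 1 [i] := by
  rw [pvDfsA_eq_wl, pvFloodB_eq_wl]
  have hebd : ∀ u v, pvEdge bombs u v → 0 ≤ v ∧ v < ((bombs.length : Nat) : Int) :=
    fun u v h => ⟨h.2.1, h.2.2.1⟩
  have hnbrA : ∀ u, 0 ≤ u → u < ((bombs.length : Nat) : Int) →
      ∀ v, (v ∈ (fun u => (pvBuildG bombs)[u.toNat]?.getD []) u ↔ pvEdge bombs u v) :=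
    fun u hu1 hu2 v => pvBuildG_mem bombs u hu1 hu2 v
  have hnbrB : ∀ u, 0 ≤ u → u < ((bombs.length : Nat) : Int) →
      ∀ v, (v ∈ pvNbrB bombs u ↔ pvEdge bombs u v) :=
    fun u _ _ v => pvNbrB_mem bombs u v
  have hnd : ([i] : List Int).Nodup := by simp
  have hbd : ∀ x ∈ ([i] : List Int), 0 ≤ x ∧ x < ((bombs.length : Nat) : Int) := by
    intro x hx; rcases List.mem_singleton.mp hx with rfl; exact ⟨h0, hn⟩
  have hq : ∀ x ∈ ([i] : List Int), x ∈ ([i] : List Int) := fun x hx => hx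
  have hcur : (1 : Int) = ((([i] : List Int).length : Nat) : Int) := by simp
  have hcl : ∀ u ∈ ([i] : List Int), u ∉ ([i] : List Int) → ∀ v, pvEdge bombs u v → v ∈ ([i] : List Int) :=
    fun u hu hnu => absurd hu hnu
  have hfuel : ([i] : List Int).length + (bombs.length - ([i] : List Int).length) ≤ bombs.length := by
    simp; omega
  obtain ⟨S1, a1, a2, a3⟩ := pvWL_spec _ (pvEdge bombs) bombs.length hnbrA hebd
    bombs.length [i] 1 [i] hnd hbd hq hcur hcl hfuel
  obtain ⟨S2, b1, b2, b3⟩ := pvWL_spec _ (pvEdge bombs) bombs.length hnbrB hebd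
    bombs.length [i] 1 [i] hnd hbd hq hcur hcl hfuel
  rw [a1, b1]
  have hmm : ∀ v, v ∈ S1 ↔ v ∈ S2 := fun v => (a3 v).trans (b3 v).symm
  exact congrArg _ ((List.perm_ext_iff_of_nodup a2 b2).mpr hmm).length_eq

-- ===== VERDICT (by name: the statement is the Claim_ definition above) =====
theorem maximumDetonation1_spec : Claim_equal_maximumDetonation1 := by
  intro bombs _ _
  show maximumDetonation1 bombs = maximumDetonation1_alt bombs
  unfold maximumDetonation1 maximumDetonation1_alt
  dsimp only
  refine PySem.List.foldl_congr_mem _ _ _ _ ?_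
  intro res i hi
  have hb := (PySem.List.mem_pyRange_one).mp hi
  rw [pv_source_eq bombs i hb.1 hb.2]
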